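-- pv_equiv track=rewrite | github.com/bkazemi/shakar | src/shakar_ref/types.py | _format_single
-- ===== SOURCE A (Python) =====
-- import math
-- from typing import (
--     Any,
--     Callable,
--     Deque,
--     Dict,
--     FrozenSet,
--     List,
--     Literal,
--     NamedTuple,
--     Optional,
--     Tuple,
--     TypeVar,
--     Union,
--     TYPE_CHECKING,
-- )
--
-- MAX_REPEATING_FRACTION_DIGITS = 20
--
-- def _has_terminating_decimal(remainder: int, per_unit: int) -> bool:
--     """Check whether remainder/per_unit has a finite decimal expansion."""
--     denominator = per_unit // math.gcd(remainder, per_unit)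
--
--     while denominator % 2 == 0:
--         denominator //= 2
--     while denominator % 5 == 0:
--         denominator //= 5
--
--     return denominator == 1
--
-- def _format_single(abs_val: int, unit: str, per_unit: int) -> str:
--     """Format a non-negative value with a single unit."""
--     if per_unit == 1:
--         return f"{abs_val}{unit}"
--
--     whole, remainder = divmod(abs_val, per_unit)
--     if remainder == 0:
--         return f"{whole}{unit}"
--
--     # Exact rational formatting using integer long-division.
--     # For terminating decimals, emit the full exact expansion.
--     # For repeating decimals, cap output to keep rendering bounded.
--     frac_digits: List[str] = []
--     r = remainder
--     if _has_terminating_decimal(remainder, per_unit):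
--         while r:
--             r *= 10
--             d, r = divmod(r, per_unit)
--             frac_digits.append(str(d))
--     else:
--         for _ in range(MAX_REPEATING_FRACTION_DIGITS):
--             r *= 10
--             d, r = divmod(r, per_unit)
--             frac_digits.append(str(d))
--             if r == 0:
--                 break
--
--     # Preserve literal shape for very tiny values in large units.
--     frac = "".join(frac_digits) or "0"
--     return f"{whole}.{frac}{unit}"
-- ===== SOURCE B (Python) =====
-- import math
--
-- MAX_REPEATING_FRACTION_DIGITS = 20
--
-- def _format_single(abs_val: int, unit: str, per_unit: int) -> str:
--     """Format a non-negative value with a single unit (closed-form fraction)."""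
--     if per_unit == 1:
--         return f"{abs_val}{unit}"
--
--     whole, remainder = divmod(abs_val, per_unit)
--     if remainder == 0:
--         return f"{whole}{unit}"
--
--     # Reduce the denominator and strip its factors of 2 and 5: the exact
--     # decimal expansion has max(a2, a5) digits when nothing else remains,
--     # and is capped otherwise.
--     d = per_unit // math.gcd(remainder, per_unit)
--     a2 = 0
--     while d % 2 == 0:
--         d //= 2
--         a2 += 1
--     a5 = 0
--     while d % 5 == 0:
--         d //= 5
--         a5 += 1
--     L = max(a2, a5) if d == 1 else MAX_REPEATING_FRACTION_DIGITS
--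
--     # One-shot exact division gives all L fraction digits at once.
--     frac = str(remainder * 10 ** L // per_unit).zfill(L)
--     return f"{whole}.{frac}{unit}"
-- ===== Notes on version B (the rewrite author's own statement) =====
-- stated objective: alternative
-- what changed: Replaces A's digit-by-digit long-division loop by a closed form: count the factors of 2 and 5 of the reduced denominator to determine the exact number L of fraction digits (capped at 20 for repeating expansions), then produce all digits at once as str(remainder * 10**L // per_unit).zfill(L); Pre_ restricts to positive per_unit, the natural domain of a unit size (A raises ZeroDivisionError at 0, and its output for negative per_unit is an accident of its loop's early break).
-- outside the precondition, e.g. on _format_single(1, 'kg', -2): A returns '-1.5kg', B returns '-1.50000000000000000000kg'; on _format_single(3, 'x', 0): A raises ZeroDivisionError, B raises ZeroDivisionError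
import Mathlib
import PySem

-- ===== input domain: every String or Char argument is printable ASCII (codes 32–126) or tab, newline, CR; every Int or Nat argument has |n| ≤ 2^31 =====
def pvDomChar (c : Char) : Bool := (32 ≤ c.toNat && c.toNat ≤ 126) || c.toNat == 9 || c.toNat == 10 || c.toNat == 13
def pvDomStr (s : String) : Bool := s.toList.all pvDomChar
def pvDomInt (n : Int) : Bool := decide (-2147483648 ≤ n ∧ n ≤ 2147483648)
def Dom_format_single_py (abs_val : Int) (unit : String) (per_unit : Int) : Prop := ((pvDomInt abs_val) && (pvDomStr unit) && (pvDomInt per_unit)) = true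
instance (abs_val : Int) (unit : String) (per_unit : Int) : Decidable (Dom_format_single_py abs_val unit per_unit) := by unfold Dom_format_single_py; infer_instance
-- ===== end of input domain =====

-- B replaces A's digit-by-digit long-division loop by a closed-form one-shot division
-- (count the factors of 2 and 5 of the reduced denominator to know the number L of digits,
-- then emit str(remainder * 10^L // per_unit).zfill(L)); objective: alternative.

-- ===== PORT A =====

-- while denominator % 2 == 0: denominator //= 2   (the 'n ≠ 0' conjunct is only for
-- termination; Python diverges at 0, and callers never pass 0 under Pre_)
def pvStrip2 (n : Int) : Int :=
  if h : n ≠ 0 ∧ PySem.Int.mod n 2 = 0 then pvStrip2 (PySem.Int.floordiv n 2) else n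
termination_by n.natAbs
decreasing_by
  obtain ⟨k, hk⟩ := (PySem.Int.mod_eq_zero_iff_dvd n 2).mp h.2
  have hf : PySem.Int.floordiv n 2 = k := by
    rw [PySem.Int.floordiv_eq_ediv_of_pos (by norm_num), hk,
      Int.mul_ediv_cancel_left _ (by norm_num)]
  rw [hf]
  have hn := h.1
  omega

-- while denominator % 5 == 0: denominator //= 5
def pvStrip5 (n : Int) : Int :=
  if h : n ≠ 0 ∧ PySem.Int.mod n 5 = 0 then pvStrip5 (PySem.Int.floordiv n 5) else n
termination_by n.natAbs
decreasing_by
  obtain ⟨k, hk⟩ := (PySem.Int.mod_eq_zero_iff_dvd n 5).mp h.2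
  have hf : PySem.Int.floordiv n 5 = k := by
    rw [PySem.Int.floordiv_eq_ediv_of_pos (by norm_num), hk,
      Int.mul_ediv_cancel_left _ (by norm_num)]
  rw [hf]
  have hn := h.1
  omega

def pvHasTerminatingDecimal (remainder : Int) (per_unit : Int) : Bool :=
  let denominator := PySem.Int.floordiv per_unit (Int.gcd remainder per_unit)
  pvStrip5 (pvStrip2 denominator) == 1

-- 'while r:' loop of the terminating branch; fuel only makes it structural — it is
-- chosen large enough that it never runs out on the inputs the branch is entered on
def pvFracLoopT (per_unit : Int) : Nat → Int → List (List Char) → List (List Char)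
  | 0, _, acc => acc
  | fuel + 1, r, acc =>
    if r ≠ 0 then
      let d := PySem.Int.floordiv (r * 10) per_unit
      let r' := PySem.Int.mod (r * 10) per_unit
      pvFracLoopT per_unit fuel r' (acc ++ [PySem.Int.toChars d])
    else acc

-- 'for _ in range(MAX_REPEATING_FRACTION_DIGITS):' loop with the 'if r == 0: break'
def pvFracLoopR (per_unit : Int) : Nat → Int → List (List Char) → List (List Char)
  | 0, _, acc => acc
  | fuel + 1, r, acc =>
    let d := PySem.Int.floordiv (r * 10) per_unit
    let r' := PySem.Int.mod (r * 10) per_unit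
    let acc' := acc ++ [PySem.Int.toChars d]
    if r' = 0 then acc' else pvFracLoopR per_unit fuel r' acc'

def format_single_py (abs_val : Int) (unit : String) (per_unit : Int) : String :=
  if per_unit == 1 then String.ofList (PySem.Int.toChars abs_val ++ unit.toList)
  else
    let whole := PySem.Int.floordiv abs_val per_unit
    let remainder := PySem.Int.mod abs_val per_unit
    if remainder == 0 then String.ofList (PySem.Int.toChars whole ++ unit.toList)
    else
      let fracDigits : List (List Char) :=
        if pvHasTerminatingDecimal remainder per_unit then
          pvFracLoopT per_unit (per_unit.natAbs + 1) remainder []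
        else
          pvFracLoopR per_unit 20 remainder []
      let fracJ := PySem.Chars.join [] fracDigits
      let frac := if fracJ = [] then ['0'] else fracJ
      String.ofList (PySem.Int.toChars whole ++ ['.'] ++ frac ++ unit.toList)

-- ===== PORT B =====

-- while d % 2 == 0: d //= 2; a2 += 1   ('n ≠ 0' conjunct only for termination, as above)
def altStrip2 (n : Int) (cnt : Nat) : Int × Nat :=
  if h : n ≠ 0 ∧ PySem.Int.mod n 2 = 0 then altStrip2 (PySem.Int.floordiv n 2) (cnt + 1)
  else (n, cnt)
termination_by n.natAbs
decreasing_by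
  obtain ⟨k, hk⟩ := (PySem.Int.mod_eq_zero_iff_dvd n 2).mp h.2
  have hf : PySem.Int.floordiv n 2 = k := by
    rw [PySem.Int.floordiv_eq_ediv_of_pos (by norm_num), hk,
      Int.mul_ediv_cancel_left _ (by norm_num)]
  rw [hf]
  have hn := h.1
  omega

-- while d % 5 == 0: d //= 5; a5 += 1
def altStrip5 (n : Int) (cnt : Nat) : Int × Nat :=
  if h : n ≠ 0 ∧ PySem.Int.mod n 5 = 0 then altStrip5 (PySem.Int.floordiv n 5) (cnt + 1)
  else (n, cnt)
termination_by n.natAbs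
decreasing_by
  obtain ⟨k, hk⟩ := (PySem.Int.mod_eq_zero_iff_dvd n 5).mp h.2
  have hf : PySem.Int.floordiv n 5 = k := by
    rw [PySem.Int.floordiv_eq_ediv_of_pos (by norm_num), hk,
      Int.mul_ediv_cancel_left _ (by norm_num)]
  rw [hf]
  have hn := h.1
  omega

def format_single_py_alt (abs_val : Int) (unit : String) (per_unit : Int) : String :=
  if per_unit == 1 then String.ofList (PySem.Int.toChars abs_val ++ unit.toList)
  else
    let whole := PySem.Int.floordiv abs_val per_unit
    let remainder := PySem.Int.mod abs_val per_unit
    if remainder == 0 then String.ofList (PySem.Int.toChars whole ++ unit.toList)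
    else
      let d0 := PySem.Int.floordiv per_unit (Int.gcd remainder per_unit)
      let s2 := altStrip2 d0 0
      let s5 := altStrip5 s2.1 0
      let L : Nat := if s5.1 == 1 then max s2.2 s5.2 else 20
      let frac := PySem.Chars.zfill
        (PySem.Int.toChars (PySem.Int.floordiv (remainder * 10 ^ L) per_unit)) (L : Int)
      String.ofList (PySem.Int.toChars whole ++ ['.'] ++ frac ++ unit.toList)

-- ===== PRECONDITION & SPEC =====
-- Pre_ keeps the natural domain of a unit size: A raises ZeroDivisionError at
-- per_unit = 0, and for negative per_unit A's output (its capped loop's early break)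
-- is an accident of the implementation that B does not reproduce.
def Pre_format_single_py (abs_val : Int) (unit : String) (per_unit : Int) : Prop :=
  0 < per_unit
instance (abs_val : Int) (unit : String) (per_unit : Int) :
    Decidable (Pre_format_single_py abs_val unit per_unit) := by
  unfold Pre_format_single_py; infer_instance
def pvWitness_format_single_py : Int × String × Int := (7, "kg", 3)

def Spec_format_single_py (abs_val : Int) (unit : String) (per_unit : Int) (out : String) : Prop := out = format_single_py_alt abs_val unit per_unit
instance (abs_val : Int) (unit : String) (per_unit : Int) (out : String) : Decidable (Spec_format_single_py abs_val unit per_unit out) := by unfold Spec_format_single_py; infer_instance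

-- ===== CLAIM (what is proved, stated in full; the proofs are below) =====
def Claim_equal_format_single_py : Prop := ∀ (abs_val : Int) (unit : String) (per_unit : Int), Dom_format_single_py abs_val unit per_unit → Pre_format_single_py abs_val unit per_unit → Spec_format_single_py abs_val unit per_unit (format_single_py abs_val unit per_unit)

-- ===== LEMMAS AND PROOFS =====

-- exactly L decimal digit characters of n, most significant first
def padDigits : Nat → Nat → List Char
  | 0, _ => []
  | L + 1, n => padDigits L (n / 10) ++ [Nat.digitChar (n % 10)]

theorem padDigits_length (L : Nat) : ∀ n : Nat, (padDigits L n).length = L := by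
  induction L with
  | zero => intro n; rfl
  | succ L ih => intro n; simp [padDigits, ih]

theorem join_nil_eq_flatten (l : List (List Char)) :
    PySem.Chars.join [] l = l.flatten := by
  induction l with
  | nil => rfl
  | cons x xs ih =>
    cases xs with
    | nil => simp [PySem.Chars.join, List.intercalate]
    | cons y ys =>
      rw [PySem.Chars.join_cons_cons]
      simp_all [PySem.Chars.join]

theorem toDigitsCore_fuel (f : Nat) : ∀ (n : Nat) (ds : List Char), n < f →
    Nat.toDigitsCore 10 f n ds = Nat.toDigitsCore 10 (n + 1) n ds := by
  induction f using Nat.strong_induction_on with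
  | _ f ih =>
    intro n ds hn
    match f, hn with
    | f + 1, hn =>
      simp only [Nat.toDigitsCore]
      by_cases h : n / 10 = 0
      · simp [h]
      · simp only [h, if_false]
        have h1 : n / 10 < n := Nat.div_lt_self (by omega) (by norm_num)
        rw [ih f (by omega) (n / 10) _ (by omega), ih n (by omega) (n / 10) _ (by omega)]

theorem toDigitsCore_acc (f : Nat) : ∀ (n : Nat) (ds : List Char), n < f →
    Nat.toDigitsCore 10 f n ds = Nat.toDigitsCore 10 f n [] ++ ds := by
  induction f using Nat.strong_induction_on with
  | _ f ih =>
    intro n ds hn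
    match f, hn with
    | f + 1, hn =>
      simp only [Nat.toDigitsCore]
      by_cases h : n / 10 = 0
      · simp [h]
      · simp only [h, if_false]
        have h1 : n / 10 < n := Nat.div_lt_self (by omega) (by norm_num)
        rw [ih f (by omega) (n / 10) _ (by omega), ih f (by omega) (n / 10) [_] (by omega),
          List.append_assoc]
        rfl

theorem toDigits_lt (n : Nat) (h : n < 10) : Nat.toDigits 10 n = [Nat.digitChar n] := by
  have h0 : n / 10 = 0 := Nat.div_eq_of_lt h
  have h1 : n % 10 = n := Nat.mod_eq_of_lt h
  simp [Nat.toDigits, Nat.toDigitsCore, h0, h1]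

theorem toDigits_step (n : Nat) (h : 10 ≤ n) :
    Nat.toDigits 10 n = Nat.toDigits 10 (n / 10) ++ [Nat.digitChar (n % 10)] := by
  have h0 : ¬ n / 10 = 0 := by intro hc; omega
  have h1 : n / 10 < n := Nat.div_lt_self (by omega) (by norm_num)
  show Nat.toDigitsCore 10 (n + 1) n [] = _
  simp only [Nat.toDigitsCore, h0, if_false]
  rw [toDigitsCore_acc n (n / 10) _ (by omega), toDigitsCore_fuel n (n / 10) [] (by omega)]
  rfl

theorem toDigits_head (n : Nat) :
    ∃ c cs, Nat.toDigits 10 n = c :: cs ∧ c ≠ '+' ∧ c ≠ '-' := by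
  induction n using Nat.strong_induction_on with
  | _ n ih =>
    by_cases h : n < 10
    · refine ⟨Nat.digitChar n, [], by rw [toDigits_lt n h], ?_, ?_⟩ <;>
        (interval_cases n <;> decide)
    · obtain ⟨c, cs, hcs, hc1, hc2⟩ := ih (n / 10) (Nat.div_lt_self (by omega) (by norm_num))
      exact ⟨c, cs ++ [Nat.digitChar (n % 10)],
        by rw [toDigits_step n (by omega), hcs]; rfl, hc1, hc2⟩

theorem padDigits_zero (L : Nat) : padDigits L 0 = List.replicate L '0' := by
  induction L with
  | zero => rfl
  | succ L ih => rw [padDigits, Nat.zero_div, ih, List.replicate_succ']; rfl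

theorem padDigits_eq_replicate (L : Nat) : ∀ n : Nat, n < 10 ^ L → 1 ≤ L →
    padDigits L n =
      List.replicate (L - (Nat.toDigits 10 n).length) '0' ++ Nat.toDigits 10 n := by
  induction L with
  | zero => omega
  | succ L ih =>
    intro n hn _
    by_cases h10 : n < 10
    · rw [padDigits, Nat.div_eq_of_lt h10, Nat.mod_eq_of_lt h10, padDigits_zero,
        toDigits_lt n h10]
      simp [List.replicate_succ']
    · have hL : 1 ≤ L := by
        rcases Nat.eq_zero_or_pos L with h | h
        · subst h; simp at hn; omega
        · exact h
      have hdiv : n / 10 < 10 ^ L := by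
        rw [Nat.div_lt_iff_lt_mul (by norm_num)]
        calc n < 10 ^ (L + 1) := hn
        _ = 10 ^ L * 10 := by ring
      rw [padDigits, ih (n / 10) hdiv hL, toDigits_step n (by omega)]
      rw [List.append_assoc]
      congr 2
      simp only [List.length_append, List.length_singleton]
      omega

theorem zfill_toChars (L : Nat) (n : Int) (h0 : 0 ≤ n) (hlt : n.toNat < 10 ^ L)
    (hL : 1 ≤ L) :
    PySem.Chars.zfill (PySem.Int.toChars n) (L : Int) = padDigits L n.toNat := by
  have hnn : ¬ n < 0 := by omega
  have hlen : (Nat.toDigits 10 n.toNat).length ≤ L :=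
    Nat.toDigits_length 10 n.toNat L hL hlt
  obtain ⟨c, cs, hcs, hc1, hc2⟩ := toDigits_head n.toNat
  rw [PySem.Int.toChars, if_neg hnn, padDigits_eq_replicate L n.toNat hlt hL]
  rw [PySem.Chars.zfill.eq_def]
  by_cases hle : (L : Int) ≤ (Nat.toDigits 10 n.toNat).length
  · rw [if_pos hle]
    have : L = (Nat.toDigits 10 n.toNat).length := by omega
    rw [← this, Nat.sub_self]
    rfl
  · rw [if_neg hle, hcs]
    have : ¬ (c = '+' ∨ c = '-') := by tauto
    simp only [this, ite_false]
    rw [← hcs, Int.toNat_natCast]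

theorem padDigits_msd (k : Nat) : ∀ d q : Nat, q < 10 ^ k → d < 10 →
    padDigits (k + 1) (d * 10 ^ k + q) = Nat.digitChar d :: padDigits k q := by
  induction k with
  | zero =>
    intro d q hq hd
    have : q = 0 := by omega
    subst this
    simp [padDigits, Nat.mod_eq_of_lt hd, Nat.div_eq_of_lt hd]
  | succ k ih =>
    intro d q hq hd
    have e0 : d * 10 ^ (k + 1) + q = 10 * (d * 10 ^ k) + q := by ring
    have e1 : (d * 10 ^ (k + 1) + q) / 10 = d * 10 ^ k + q / 10 := by
      rw [e0, Nat.mul_add_div (by norm_num)]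
    have e2 : (d * 10 ^ (k + 1) + q) % 10 = q % 10 := by
      rw [e0, Nat.mul_add_mod]
    rw [padDigits, e1, e2, ih d (q / 10)
      (by rw [Nat.div_lt_iff_lt_mul (by norm_num)]; rw [pow_succ] at hq; omega) hd]
    rfl

theorem emod_mul_pow (a b p : Int) : (a % p * b) % p = (a * b) % p := by
  conv_rhs => rw [Int.mul_emod, ← Int.emod_emod_of_dvd a dvd_rfl, ← Int.mul_emod]

theorem shift_emod (r p : Int) (j : Nat) :
    ((r * 10) % p * 10 ^ j) % p = (r * 10 ^ (j + 1)) % p := by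
  rw [emod_mul_pow]
  congr 1
  ring

theorem step_facts (p r : Int) (hp : 0 < p) (hr0 : 0 ≤ r) (hrp : r < p) :
    0 ≤ (r * 10) / p ∧ (r * 10) / p < 10 ∧ 0 ≤ (r * 10) % p ∧ (r * 10) % p < p ∧
    ∀ k : Nat, ((r * 10 ^ (k + 1)) / p).toNat
        = ((r * 10) / p).toNat * 10 ^ k + (((r * 10) % p * 10 ^ k) / p).toNat ∧
      (((r * 10) % p * 10 ^ k) / p).toNat < 10 ^ k := by
  have hd0 : 0 ≤ (r * 10) / p := Int.ediv_nonneg (by omega) (by omega)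
  have hd10 : (r * 10) / p < 10 := by
    rw [Int.ediv_lt_iff_lt_mul hp]
    omega
  have hm0 : 0 ≤ (r * 10) % p := Int.emod_nonneg _ (by omega)
  have hmp : (r * 10) % p < p := Int.emod_lt_of_pos _ hp
  refine ⟨hd0, hd10, hm0, hmp, fun k => ?_⟩
  have hq0 : 0 ≤ ((r * 10) % p * 10 ^ k) / p := Int.ediv_nonneg (by positivity) (by omega)
  have hqlt : ((r * 10) % p * 10 ^ k) / p < 10 ^ k := by
    rw [Int.ediv_lt_iff_lt_mul hp]
    have : (10:Int) ^ k > 0 := by positivity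
    nlinarith
  have key : (r * 10 ^ (k + 1)) / p
      = (r * 10) / p * 10 ^ k + ((r * 10) % p * 10 ^ k) / p := by
    have e : r * 10 ^ (k + 1) = ((r * 10) / p * 10 ^ k) * p + (r * 10) % p * 10 ^ k := by
      have := Int.ediv_add_emod (r * 10) p
      calc r * 10 ^ (k + 1) = (r * 10) * 10 ^ k := by ring
      _ = (p * ((r * 10) / p) + (r * 10) % p) * 10 ^ k := by rw [this]
      _ = _ := by ring
    rw [e, add_comm, Int.add_mul_ediv_right _ _ (by omega : p ≠ 0)]
    omega
  obtain ⟨Dn, hDn⟩ : ∃ Dn : Nat, (r * 10) / p = (Dn : Int) :=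
    ⟨_, (Int.toNat_of_nonneg hd0).symm⟩
  obtain ⟨Qn, hQn⟩ : ∃ Qn : Nat, ((r * 10) % p * 10 ^ k) / p = (Qn : Int) :=
    ⟨_, (Int.toNat_of_nonneg hq0).symm⟩
  rw [key, hDn, hQn]
  have e : (Dn : Int) * 10 ^ k + (Qn : Int) = ((Dn * 10 ^ k + Qn : Nat) : Int) := by
    push_cast; ring
  rw [hQn] at hqlt
  constructor
  · simp only [e, Int.toNat_natCast]
  · exact_mod_cast hqlt

theorem toChars_digit (d : Int) (h0 : 0 ≤ d) (h10 : d < 10) :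
    PySem.Int.toChars d = [Nat.digitChar d.toNat] := by
  rw [PySem.Int.toChars, if_neg (by omega), toDigits_lt d.toNat (by omega)]

theorem padDigits_one (d : Int) (h0 : 0 ≤ d) (h10 : d < 10) :
    padDigits 1 d.toNat = [Nat.digitChar d.toNat] := by
  have : d.toNat < 10 := by omega
  simp [padDigits, Nat.div_eq_of_lt this, Nat.mod_eq_of_lt this]

theorem loopR_nz (p : Int) (hp : 0 < p) :
    ∀ (k : Nat) (r : Int) (acc : List (List Char)),
    0 ≤ r → r < p → (∀ j, 1 ≤ j → j ≤ k → (r * 10 ^ j) % p ≠ 0) →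
    PySem.Chars.join [] (pvFracLoopR p k r acc)
      = PySem.Chars.join [] acc ++ padDigits k ((r * 10 ^ k) / p).toNat := by
  intro k
  induction k with
  | zero => intro r acc _ _ _; simp [pvFracLoopR, padDigits]
  | succ k ih =>
    intro r acc hr0 hrp hnz
    obtain ⟨hd0, hd10, hm0, hmp, hsplit⟩ := step_facts p r hp hr0 hrp
    have hmod : PySem.Int.mod (r * 10) p = (r * 10) % p := PySem.Int.mod_eq_emod_of_pos hp
    have hdiv : PySem.Int.floordiv (r * 10) p = (r * 10) / p :=
      PySem.Int.floordiv_eq_ediv_of_pos hp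
    have hne : ¬ (r * 10) % p = 0 := by
      have := hnz 1 le_rfl (by omega)
      simpa using this
    rw [pvFracLoopR]
    simp only [hmod, hdiv, if_neg hne]
    rw [ih ((r * 10) % p) _ hm0 hmp ?_]
    · rw [join_nil_eq_flatten, join_nil_eq_flatten, List.flatten_append]
      simp only [List.flatten, List.append_nil]
      rw [toChars_digit _ hd0 hd10, (hsplit k).1,
        padDigits_msd k _ _ (hsplit k).2 (by omega), ← join_nil_eq_flatten]
      simp
    · intro j hj1 hjk
      rw [shift_emod]
      exact hnz (j + 1) (by omega) (by omega)

theorem loopT_zero (p : Int) (f : Nat) (acc : List (List Char)) :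
    pvFracLoopT p f 0 acc = acc := by
  cases f <;> simp [pvFracLoopT]

theorem loopT_eq (p : Int) (hp : 0 < p) :
    ∀ (f : Nat) (t : Nat) (r : Int) (acc : List (List Char)),
    0 < r → r < p → 1 ≤ t → t ≤ f → (r * 10 ^ t) % p = 0 →
    (∀ j, 1 ≤ j → j < t → (r * 10 ^ j) % p ≠ 0) →
    PySem.Chars.join [] (pvFracLoopT p f r acc)
      = PySem.Chars.join [] acc ++ padDigits t ((r * 10 ^ t) / p).toNat := by
  intro f
  induction f with
  | zero => intro t r acc _ _ _ _; omega
  | succ f ih =>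
    intro t r acc hr0 hrp ht1 htf hz hmin
    obtain ⟨hd0, hd10, hm0, hmp, hsplit⟩ := step_facts p r hp (by omega) hrp
    have hmod : PySem.Int.mod (r * 10) p = (r * 10) % p := PySem.Int.mod_eq_emod_of_pos hp
    have hdiv : PySem.Int.floordiv (r * 10) p = (r * 10) / p :=
      PySem.Int.floordiv_eq_ediv_of_pos hp
    rw [pvFracLoopT]
    simp only [hmod, hdiv, if_pos (by omega : r ≠ 0)]
    by_cases ht : t = 1
    · subst ht
      have hz1 : (r * 10) % p = 0 := by simpa using hz
      rw [hz1, loopT_zero, join_nil_eq_flatten, join_nil_eq_flatten, List.flatten_append]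
      simp only [List.flatten, List.append_nil]
      rw [toChars_digit _ hd0 hd10, pow_one, padDigits_one _ hd0 hd10]
      simp
    · have hne : (r * 10) % p ≠ 0 := by
        have := hmin 1 le_rfl (by omega)
        simpa using this
      have ih' := ih (t - 1) ((r * 10) % p) (acc ++ [PySem.Int.toChars ((r * 10) / p)])
        (by omega) hmp (by omega) (by omega) ?_ ?_
      · rw [ih']
        rw [join_nil_eq_flatten, join_nil_eq_flatten, List.flatten_append]
        simp only [List.flatten, List.append_nil]
        have et : t = (t - 1) + 1 := by omega
        rw [toChars_digit _ hd0 hd10]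
        conv_rhs => rw [et, (hsplit (t - 1)).1,
          padDigits_msd (t - 1) _ _ (hsplit (t - 1)).2 (by omega)]
        simp
      · rw [shift_emod]
        have : t - 1 + 1 = t := by omega
        rw [this]
        exact hz
      · intro j hj1 hjt
        rw [shift_emod]
        exact hmin (j + 1) (by omega) (by omega)

theorem exists_strip (f : Nat) (hf : 2 ≤ f) : ∀ D : Nat, 0 < D →
    ∃ a m, D = f ^ a * m ∧ ¬ f ∣ m ∧ 0 < m := by
  intro D
  induction D using Nat.strong_induction_on with
  | _ D ih =>
    intro hD
    by_cases h : f ∣ D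
    · obtain ⟨c, hc⟩ := h
      have hc0 : 0 < c := by
        rcases Nat.eq_zero_or_pos c with h0 | h0
        · subst h0; omega
        · exact h0
      have hlt : c < D := by rw [hc]; nlinarith
      obtain ⟨a, m, hm, hnd, hm0⟩ := ih c hlt hc0
      exact ⟨a + 1, m, by rw [hc, hm]; ring, hnd, hm0⟩
    · exact ⟨0, D, by simp, h, hD⟩

theorem floordiv_two_exact (n : Int) : PySem.Int.floordiv n 2 = n / 2 :=
  PySem.Int.floordiv_eq_ediv_of_pos (by norm_num)

theorem floordiv_five_exact (n : Int) : PySem.Int.floordiv n 5 = n / 5 :=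
  PySem.Int.floordiv_eq_ediv_of_pos (by norm_num)

theorem pvStrip2_eq (a : Nat) (m : Int) (hm : 0 < m) (ho : ¬ (2:Int) ∣ m) :
    pvStrip2 (2 ^ a * m) = m := by
  induction a with
  | zero =>
    rw [pvStrip2, dif_neg]
    · ring_nf
    · rw [pow_zero, one_mul]
      intro hcon
      exact ho ((PySem.Int.mod_eq_zero_iff_dvd m 2).mp hcon.2)
  | succ a ih =>
    have hcond : (2:Int) ^ (a + 1) * m ≠ 0 ∧ PySem.Int.mod (2 ^ (a + 1) * m) 2 = 0 :=
      ⟨by positivity, (PySem.Int.mod_eq_zero_iff_dvd _ 2).mpr ⟨2 ^ a * m, by ring⟩⟩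
    have e : 2 ^ (a + 1) * m / 2 = 2 ^ a * m := by
      rw [pow_succ]
      rw [show (2:Int) ^ a * 2 * m = 2 * (2 ^ a * m) by ring,
        Int.mul_ediv_cancel_left _ (by norm_num)]
    rw [pvStrip2, dif_pos hcond, floordiv_two_exact, e, ih]

theorem pvStrip5_eq (a : Nat) (m : Int) (hm : 0 < m) (ho : ¬ (5:Int) ∣ m) :
    pvStrip5 (5 ^ a * m) = m := by
  induction a with
  | zero =>
    rw [pvStrip5, dif_neg]
    · ring_nf
    · rw [pow_zero, one_mul]
      intro hcon
      exact ho ((PySem.Int.mod_eq_zero_iff_dvd m 5).mp hcon.2)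
  | succ a ih =>
    have hcond : (5:Int) ^ (a + 1) * m ≠ 0 ∧ PySem.Int.mod (5 ^ (a + 1) * m) 5 = 0 :=
      ⟨by positivity, (PySem.Int.mod_eq_zero_iff_dvd _ 5).mpr ⟨5 ^ a * m, by ring⟩⟩
    have e : 5 ^ (a + 1) * m / 5 = 5 ^ a * m := by
      rw [pow_succ]
      rw [show (5:Int) ^ a * 5 * m = 5 * (5 ^ a * m) by ring,
        Int.mul_ediv_cancel_left _ (by norm_num)]
    rw [pvStrip5, dif_pos hcond, floordiv_five_exact, e, ih]

theorem altStrip2_eq (a : Nat) (m : Int) (hm : 0 < m) (ho : ¬ (2:Int) ∣ m) :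
    ∀ cnt, altStrip2 (2 ^ a * m) cnt = (m, cnt + a) := by
  induction a with
  | zero =>
    intro cnt
    rw [altStrip2, dif_neg]
    · simp
    · rw [pow_zero, one_mul]
      intro hcon
      exact ho ((PySem.Int.mod_eq_zero_iff_dvd m 2).mp hcon.2)
  | succ a ih =>
    intro cnt
    have hcond : (2:Int) ^ (a + 1) * m ≠ 0 ∧ PySem.Int.mod (2 ^ (a + 1) * m) 2 = 0 :=
      ⟨by positivity, (PySem.Int.mod_eq_zero_iff_dvd _ 2).mpr ⟨2 ^ a * m, by ring⟩⟩
    have e : 2 ^ (a + 1) * m / 2 = 2 ^ a * m := by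
      rw [pow_succ]
      rw [show (2:Int) ^ a * 2 * m = 2 * (2 ^ a * m) by ring,
        Int.mul_ediv_cancel_left _ (by norm_num)]
    rw [altStrip2, dif_pos hcond, floordiv_two_exact, e, ih (cnt + 1)]
    congr 1
    omega

theorem altStrip5_eq (a : Nat) (m : Int) (hm : 0 < m) (ho : ¬ (5:Int) ∣ m) :
    ∀ cnt, altStrip5 (5 ^ a * m) cnt = (m, cnt + a) := by
  induction a with
  | zero =>
    intro cnt
    rw [altStrip5, dif_neg]
    · simp
    · rw [pow_zero, one_mul]
      intro hcon
      exact ho ((PySem.Int.mod_eq_zero_iff_dvd m 5).mp hcon.2)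
  | succ a ih =>
    intro cnt
    have hcond : (5:Int) ^ (a + 1) * m ≠ 0 ∧ PySem.Int.mod (5 ^ (a + 1) * m) 5 = 0 :=
      ⟨by positivity, (PySem.Int.mod_eq_zero_iff_dvd _ 5).mpr ⟨5 ^ a * m, by ring⟩⟩
    have e : 5 ^ (a + 1) * m / 5 = 5 ^ a * m := by
      rw [pow_succ]
      rw [show (5:Int) ^ a * 5 * m = 5 * (5 ^ a * m) by ring,
        Int.mul_ediv_cancel_left _ (by norm_num)]
    rw [altStrip5, dif_pos hcond, floordiv_five_exact, e, ih (cnt + 1)]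
    congr 1
    omega

theorem nat_dvd_iff (P R X G D E : Nat) (hG : 0 < G) (hP : P = G * D)
    (hR : R = G * E) (hco : Nat.Coprime E D) :
    (P ∣ R * X ↔ D ∣ X) := by
  subst hP hR
  constructor
  · intro h
    have : G * D ∣ G * (E * X) := by
      rw [← mul_assoc]
      exact h
    exact Nat.Coprime.dvd_of_dvd_mul_left hco.symm ((Nat.mul_dvd_mul_iff_left hG).mp this)
  · rintro ⟨c, rfl⟩
    exact ⟨E * c, by ring⟩

theorem pow_dvd_ten (a2 a5 m k : Nat) (h2 : ¬ 2 ∣ m) (h5 : ¬ 5 ∣ m) :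
    (2 ^ a2 * (5 ^ a5 * m) ∣ 10 ^ k ↔ m = 1 ∧ a2 ≤ k ∧ a5 ≤ k) := by
  have hten : (10 : Nat) ^ k = 2 ^ k * 5 ^ k := by
    rw [show (10:Nat) = 2 * 5 by norm_num, mul_pow]
  have hcm2 : Nat.Coprime m 2 := ((Nat.Prime.coprime_iff_not_dvd Nat.prime_two).mpr h2).symm
  have hcm5 : Nat.Coprime m 5 := ((Nat.Prime.coprime_iff_not_dvd Nat.prime_five).mpr h5).symm
  constructor
  · intro h
    rw [hten] at h
    have hm1 : m = 1 := by
      have hmdvd : m ∣ 2 ^ k * 5 ^ k := dvd_trans ⟨2 ^ a2 * 5 ^ a5, by ring⟩ h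
      have : Nat.Coprime m (2 ^ k * 5 ^ k) :=
        Nat.Coprime.mul_right (hcm2.pow_right k) (hcm5.pow_right k)
      exact Nat.Coprime.eq_one_of_dvd this hmdvd
    subst hm1
    refine ⟨rfl, ?_, ?_⟩
    · have h2d : 2 ^ a2 ∣ 2 ^ k * 5 ^ k := dvd_trans ⟨5 ^ a5, by ring⟩ h
      have cop : Nat.Coprime (2 ^ a2) (5 ^ k) := Nat.Coprime.pow _ _ (by decide)
      have : 2 ^ a2 ∣ 2 ^ k := Nat.Coprime.dvd_of_dvd_mul_right cop h2d
      exact (Nat.pow_dvd_pow_iff_le_right (by norm_num)).mp this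
    · have h5d : 5 ^ a5 ∣ 2 ^ k * 5 ^ k := dvd_trans ⟨2 ^ a2, by ring⟩ h
      rw [mul_comm] at h5d
      have cop : Nat.Coprime (5 ^ a5) (2 ^ k) := Nat.Coprime.pow _ _ (by decide)
      have : 5 ^ a5 ∣ 5 ^ k := Nat.Coprime.dvd_of_dvd_mul_right cop h5d
      exact (Nat.pow_dvd_pow_iff_le_right (by norm_num)).mp this
  · rintro ⟨rfl, hk2, hk5⟩
    rw [hten, mul_one]
    exact mul_dvd_mul (pow_dvd_pow 2 hk2) (pow_dvd_pow 5 hk5)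

theorem zero_rem_iff (p r : Int) (hp : 0 < p) (hr0 : 0 < r) (hrp : r < p)
    (a2 a5 m : Nat) (hdec : (p / (Int.gcd r p : Int)).toNat = 2 ^ a2 * (5 ^ a5 * m))
    (h2 : ¬ 2 ∣ m) (h5 : ¬ 5 ∣ m) (hm : 0 < m) :
    ∀ k : Nat, (r * 10 ^ k) % p = 0 ↔ (m = 1 ∧ a2 ≤ k ∧ a5 ≤ k) := by
  intro k
  have hG : 0 < Int.gcd r p := Int.gcd_pos_iff.mpr (Or.inr (by omega))
  have hRr : (r.natAbs : Int) = r := Int.natAbs_of_nonneg (by omega)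
  have hPp : (p.natAbs : Int) = p := Int.natAbs_of_nonneg (by omega)
  have hgcd : Int.gcd r p = Nat.gcd r.natAbs p.natAbs := rfl
  have hGP : Int.gcd r p ∣ p.natAbs := by rw [hgcd]; exact Nat.gcd_dvd_right _ _
  have hGR : Int.gcd r p ∣ r.natAbs := by rw [hgcd]; exact Nat.gcd_dvd_left _ _
  have hdec' : p.natAbs / Int.gcd r p = 2 ^ a2 * (5 ^ a5 * m) := by
    have e : p / (Int.gcd r p : Int) = ((p.natAbs / Int.gcd r p : Nat) : Int) := by
      conv_lhs => rw [← hPp]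
      rw [Int.ofNat_ediv_ofNat, hPp]
    rw [e, Int.toNat_natCast] at hdec
    exact hdec
  have hP : p.natAbs = Int.gcd r p * (p.natAbs / Int.gcd r p) :=
    (Nat.mul_div_cancel' hGP).symm
  have hR : r.natAbs = Int.gcd r p * (r.natAbs / Int.gcd r p) :=
    (Nat.mul_div_cancel' hGR).symm
  have hco : Nat.Coprime (r.natAbs / Int.gcd r p) (p.natAbs / Int.gcd r p) := by
    rw [hgcd]
    exact Nat.coprime_div_gcd_div_gcd (by rw [← hgcd]; exact hG)
  constructor
  · intro h
    have hdvd : p ∣ r * 10 ^ k := Int.dvd_of_emod_eq_zero h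
    have hnat : p.natAbs ∣ r.natAbs * 10 ^ k := by
      rw [← Int.natCast_dvd_natCast]
      push_cast [hRr, hPp]
      exact hdvd
    have := (nat_dvd_iff p.natAbs r.natAbs (10 ^ k) (Int.gcd r p)
      (p.natAbs / Int.gcd r p) (r.natAbs / Int.gcd r p) hG hP hR hco).mp hnat
    rw [hdec'] at this
    exact (pow_dvd_ten a2 a5 m k h2 h5).mp this
  · intro h
    have hd10 : (2 ^ a2 * (5 ^ a5 * m)) ∣ 10 ^ k := (pow_dvd_ten a2 a5 m k h2 h5).mpr h
    rw [← hdec'] at hd10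
    have hnat := (nat_dvd_iff p.natAbs r.natAbs (10 ^ k) (Int.gcd r p)
      (p.natAbs / Int.gcd r p) (r.natAbs / Int.gcd r p) hG hP hR hco).mpr hd10
    apply Int.emod_eq_zero_of_dvd
    have hc : (p.natAbs : Int) ∣ (r.natAbs : Int) * 10 ^ k := by exact_mod_cast hnat
    rw [hRr, hPp] at hc
    exact hc

-- zfill of the one-shot quotient is exactly padDigits (B's side)
theorem fracB_eq (p r : Int) (hp : 0 < p) (hr0 : 0 ≤ r) (hrp : r < p) (L : Nat)
    (hL : 1 ≤ L) :
    PySem.Chars.zfill (PySem.Int.toChars ((r * 10 ^ L) / p)) (L : Int)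
      = padDigits L ((r * 10 ^ L) / p).toNat := by
  have h0 : 0 ≤ (r * 10 ^ L) / p := Int.ediv_nonneg (by positivity) (by omega)
  have hlt : (r * 10 ^ L) / p < 10 ^ L := by
    rw [Int.ediv_lt_iff_lt_mul hp]
    have h10 : (0:Int) < 10 ^ L := by positivity
    nlinarith
  refine zfill_toChars L _ h0 ?_ hL
  have hlt' : (r * 10 ^ L) / p < ((10 ^ L : Nat) : Int) := by push_cast; exact hlt
  omega

-- the decomposition of the reduced denominator, with all the bounds the main proof uses
theorem denom_decomp (p r : Int) (hp : 0 < p) (hr0 : 0 < r) (hrp : r < p) :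
    ∃ a2 a5 m : Nat,
      (p / (Int.gcd r p : Int)).toNat = 2 ^ a2 * (5 ^ a5 * m) ∧ ¬ 2 ∣ m ∧ ¬ 5 ∣ m ∧ 0 < m ∧
      PySem.Int.floordiv p (Int.gcd r p : Int) = ((2 ^ a2 * (5 ^ a5 * m) : Nat) : Int) ∧
      (m = 1 → 1 ≤ max a2 a5) ∧ max a2 a5 ≤ p.natAbs := by
  have hG : 0 < Int.gcd r p := Int.gcd_pos_iff.mpr (Or.inr (by omega))
  have hgdvd_p : ((Int.gcd r p : Int)) ∣ p := Int.gcd_dvd_right r p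
  have hgdvd_r : ((Int.gcd r p : Int)) ∣ r := Int.gcd_dvd_left r p
  generalize hGdef : Int.gcd r p = G at hG hgdvd_p hgdvd_r ⊢
  have hGi : (0:Int) < (G : Int) := by exact_mod_cast hG
  obtain ⟨c, hc⟩ := hgdvd_p
  have hcpos : 0 < c := by nlinarith
  have hdiv : p / (G : Int) = c := by
    rw [hc, Int.mul_ediv_cancel_left _ (by omega)]
  obtain ⟨a2, M, hM, h2M, hMpos⟩ := exists_strip 2 (by norm_num) c.toNat (by omega)
  obtain ⟨a5, m, hm, h5m, hmpos⟩ := exists_strip 5 (by norm_num) M hMpos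
  have h2m : ¬ 2 ∣ m := by
    intro hcon
    exact h2M (hm ▸ Dvd.dvd.mul_left hcon (5 ^ a5))
  have hdec : (p / (G : Int)).toNat = 2 ^ a2 * (5 ^ a5 * m) := by
    rw [hdiv, hM, hm]
  refine ⟨a2, a5, m, hdec, h2m, h5m, hmpos, ?_, ?_, ?_⟩
  · rw [PySem.Int.floordiv_eq_ediv_of_pos hGi, hdiv]
    have hcc : c = ((c.toNat : Nat) : Int) := (Int.toNat_of_nonneg (by omega)).symm
    rw [hcc, hM, hm]
  · -- m = 1 → 1 ≤ max a2 a5 : otherwise c = 1, i.e. p = gcd ≤ r < p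
    intro hm1
    by_contra hcon
    push_neg at hcon
    have ha2 : a2 = 0 := by omega
    have ha5 : a5 = 0 := by omega
    have hc1 : c.toNat = 1 := by simp [hM, hm, hm1, ha2, ha5]
    have hceq : c = 1 := by omega
    have : ((G : Nat) : Int) ≤ r := Int.le_of_dvd hr0 hgdvd_r
    rw [hceq, mul_one] at hc
    omega
  · -- max a2 a5 ≤ p.natAbs via 2^a2 ≤ c ≤ p and 5^a5 ≤ c ≤ p
    have hcp : c.toNat ≤ p.natAbs := by
      have hdp : c ∣ p := ⟨(G : Int), by rw [hc]; ring⟩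
      have := Int.le_of_dvd hp hdp
      omega
    have h2le : 2 ^ a2 ≤ c.toNat := Nat.le_of_dvd (by omega) ⟨5 ^ a5 * m, by rw [hM, hm]⟩
    have h5le : 5 ^ a5 ≤ c.toNat := Nat.le_of_dvd (by omega) ⟨2 ^ a2 * m, by rw [hM, hm]; ring⟩
    have ha2 : a2 < 2 ^ a2 := Nat.lt_two_pow_self
    have ha5' : a5 < 2 ^ a5 := Nat.lt_two_pow_self
    have h25 : (2:Nat) ^ a5 ≤ 5 ^ a5 := Nat.pow_le_pow_left (by norm_num) a5
    omega

-- the whole fraction part agrees (divisor positive under Pre_)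
theorem frac_eq_pos (p r : Int) (hp : 0 < p) (hp1 : p ≠ 1) (hr0 : 0 < r) (hrp : r < p) :
    (let fracDigits : List (List Char) :=
        if pvHasTerminatingDecimal r p then
          pvFracLoopT p (p.natAbs + 1) r []
        else
          pvFracLoopR p 20 r []
      let fracJ := PySem.Chars.join [] fracDigits
      if fracJ = [] then ['0'] else fracJ)
    = (let d0 := PySem.Int.floordiv p (Int.gcd r p)
      let s2 := altStrip2 d0 0
      let s5 := altStrip5 s2.1 0
      let L : Nat := if s5.1 == 1 then max s2.2 s5.2 else 20
      PySem.Chars.zfill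
        (PySem.Int.toChars (PySem.Int.floordiv (r * 10 ^ L) p)) (L : Int)) := by
  obtain ⟨a2, a5, m, hdec, h2m, h5m, hmpos, hflo, hmax1, hmaxP⟩ := denom_decomp p r hp hr0 hrp
  have hzr := zero_rem_iff p r hp hr0 hrp a2 a5 m hdec h2m h5m hmpos
  -- strip evaluations
  have hcast : ((2 ^ a2 * (5 ^ a5 * m) : Nat) : Int)
      = 2 ^ a2 * ((5 ^ a5 * m : Nat) : Int) := by push_cast; ring
  have hM2 : ¬ (2:Int) ∣ ((5 ^ a5 * m : Nat) : Int) := by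
    intro hcon
    have : (2:Nat) ∣ 5 ^ a5 * m := by exact_mod_cast hcon
    have h5odd : ¬ (2:Nat) ∣ 5 ^ a5 := by
      intro h
      have := Nat.Coprime.eq_one_of_dvd (Nat.Coprime.pow_right a5 (by decide)) h
      omega
    rcases (Nat.Prime.dvd_mul Nat.prime_two).mp this with h | h
    · exact h5odd h
    · exact h2m h
  have hcast5 : ((5 ^ a5 * m : Nat) : Int) = 5 ^ a5 * ((m : Nat) : Int) := by push_cast; ring
  have hm5 : ¬ (5:Int) ∣ ((m : Nat) : Int) := by
    intro hcon
    exact h5m (by exact_mod_cast hcon)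
  have hstripA : pvStrip5 (pvStrip2 (PySem.Int.floordiv p (Int.gcd r p))) = (m : Int) := by
    rw [hflo, hcast, pvStrip2_eq a2 _ (by positivity) hM2, hcast5,
      pvStrip5_eq a5 _ (by exact_mod_cast hmpos) hm5]
  have hstripB2 : altStrip2 (PySem.Int.floordiv p (Int.gcd r p)) 0
      = (((5 ^ a5 * m : Nat) : Int), a2) := by
    rw [hflo, hcast, altStrip2_eq a2 _ (by positivity) hM2 0]
    simp
  have hstripB5 : altStrip5 ((5 ^ a5 * m : Nat) : Int) 0 = (((m : Nat) : Int), a5) := by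
    rw [hcast5, altStrip5_eq a5 _ (by exact_mod_cast hmpos) hm5 0]
    simp
  simp only [hstripB2, hstripB5]
  by_cases hm1 : m = 1
  · -- terminating case
    subst hm1
    set t := max a2 a5 with ht
    have ht1 : 1 ≤ t := hmax1 rfl
    have hcondA : pvHasTerminatingDecimal r p = true := by
      rw [pvHasTerminatingDecimal]
      simp only [hstripA]
      simp
    have hcondB : ((((1:Nat) : Int)) == 1) = true := by decide
    simp only [hcondA, hcondB, eq_self_iff_true, if_true, Bool.false_eq_true, if_false]
    have hz : (r * 10 ^ t) % p = 0 :=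
      (hzr t).mpr ⟨rfl, le_max_left _ _, le_max_right _ _⟩
    have hmin : ∀ j, 1 ≤ j → j < t → (r * 10 ^ j) % p ≠ 0 := by
      intro j _ hjt hcon
      obtain ⟨_, hj2, hj5⟩ := (hzr j).mp hcon
      omega
    have hA := loopT_eq p hp (p.natAbs + 1) t r [] hr0 hrp ht1 (by omega) hz hmin
    have hAne : PySem.Chars.join [] (pvFracLoopT p (p.natAbs + 1) r []) ≠ [] := by
      rw [hA]
      intro hcon
      have := congrArg List.length hcon
      simp [padDigits_length] at this
      omega
    rw [if_neg hAne, hA]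
    rw [PySem.Int.floordiv_eq_ediv_of_pos hp, fracB_eq p r hp (by omega) hrp t ht1]
    simp [join_nil_eq_flatten]
  · -- repeating case: exactly 20 digits
    have hcondA : pvHasTerminatingDecimal r p = false := by
      rw [pvHasTerminatingDecimal]
      simp only [hstripA]
      simp
      intro hcon
      apply hm1
      exact_mod_cast hcon
    have hcondB : ((((m:Nat) : Int)) == 1) = false := by
      simp
      intro hcon
      exact hm1 (by exact_mod_cast hcon)
    simp only [hcondA, hcondB, eq_self_iff_true, if_true, Bool.false_eq_true, if_false]
    have hnz : ∀ j, 1 ≤ j → j ≤ 20 → (r * 10 ^ j) % p ≠ 0 := by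
      intro j _ _ hcon
      exact hm1 ((hzr j).mp hcon).1
    have hA := loopR_nz p hp 20 r [] (by omega) hrp hnz
    have hAne : PySem.Chars.join [] (pvFracLoopR p 20 r []) ≠ [] := by
      rw [hA]
      intro hcon
      have := congrArg List.length hcon
      simp [padDigits_length] at this
    rw [if_neg hAne, hA]
    rw [PySem.Int.floordiv_eq_ediv_of_pos hp, fracB_eq p r hp (by omega) hrp 20 (by norm_num)]
    simp [join_nil_eq_flatten]

-- ===== VERDICT (by name: the statement is the Claim_ definition above) =====
theorem format_single_py_spec : Claim_equal_format_single_py := by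
  intro abs_val unit per_unit _ hpre
  unfold Pre_format_single_py at hpre
  unfold Spec_format_single_py
  by_cases hp1 : per_unit = 1
  · simp [format_single_py, format_single_py_alt, hp1]
  · have hbeq : (per_unit == 1) = false := by simp [hp1]
    rw [format_single_py, format_single_py_alt]
    simp only [hbeq, Bool.false_eq_true, if_false]
    by_cases hr : PySem.Int.mod abs_val per_unit = 0
    · have : (PySem.Int.mod abs_val per_unit == 0) = true := by simp [hr]
      simp only [this, if_true]
    · have hne : (PySem.Int.mod abs_val per_unit == 0) = false := by simp [hr]
      simp only [hne, Bool.false_eq_true, if_false]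
      congr 1
      congr 1
      congr 1
      have hb0 := PySem.Int.mod_nonneg (a := abs_val) (b := per_unit) hpre
      have hbl := PySem.Int.mod_lt (a := abs_val) (b := per_unit) hpre
      exact frac_eq_pos per_unit (PySem.Int.mod abs_val per_unit) hpre hp1
        (by omega) (by omega)
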